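-- pv_equiv track=rewrite | github.com/Samsung-CT/Samsumg | 남동우/0710.py | make_dragon_curve
-- ===== SOURCE A (Python) =====
-- def rotate_x_y(input_x, input_y):
--     return -1 * input_y, input_x
--
-- def get_first_direction(direction):
--     if direction == 0:
--         return 1, 0
--     if direction == 1:
--         return 0, -1
--     if direction == 2:
--         return -1, 0
--     if direction == 3:
--         return 0, 1
--
-- def make_dragon_curve(direction, goal_generation):
--     # 무조건 시계 방향으로 90도 회전해, 그 다음 선분을 잇는다.
--     first_x, first_y = get_first_direction(direction)
--     current_generation = 0
--     add_list = [(first_x, first_y)]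
--
--     while current_generation < goal_generation:
--         compute_list = add_list[::-1]
--         for element in compute_list:
--             compute_x, compute_y = element
--             rotating_x, rotating_y = rotate_x_y(-1 * compute_x, -1 * compute_y)
--             add_list.append((rotating_x, rotating_y))
--
--         current_generation += 1
--
--     return add_list
-- ===== SOURCE B (Python) =====
-- def get_first_direction(direction):
--     if direction == 0:
--         return 1, 0
--     if direction == 1:
--         return 0, -1
--     if direction == 2:
--         return -1, 0
--     if direction == 3:
--         return 0, 1
--
-- def strip_twos(i):
--     while i % 2 == 0:
--         i //= 2
--     return i
--
-- def make_dragon_curve(direction, goal_generation):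
--     # one forward pass: turn at step i given by the paper-folding (2-adic) rule
--     x, y = get_first_direction(direction)
--     total = 2 ** goal_generation if goal_generation > 0 else 1
--     out = [(x, y)]
--     for i in range(1, total):
--         if strip_twos(i) % 4 == 3:
--             x, y = -y, x          # counterclockwise
--         else:
--             x, y = y, -x          # clockwise
--         out.append((x, y))
--     return out
-- ===== Notes on version B (the rewrite author's own statement) =====
-- stated objective: alternative
-- what changed: Replaces the generation-doubling loop (copy, reverse, rotate, append each generation) with a single forward pass that emits each direction from the previous one, choosing the turn at step i by the 2-adic paper-folding rule (odd part of i mod 4).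
import Mathlib
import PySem

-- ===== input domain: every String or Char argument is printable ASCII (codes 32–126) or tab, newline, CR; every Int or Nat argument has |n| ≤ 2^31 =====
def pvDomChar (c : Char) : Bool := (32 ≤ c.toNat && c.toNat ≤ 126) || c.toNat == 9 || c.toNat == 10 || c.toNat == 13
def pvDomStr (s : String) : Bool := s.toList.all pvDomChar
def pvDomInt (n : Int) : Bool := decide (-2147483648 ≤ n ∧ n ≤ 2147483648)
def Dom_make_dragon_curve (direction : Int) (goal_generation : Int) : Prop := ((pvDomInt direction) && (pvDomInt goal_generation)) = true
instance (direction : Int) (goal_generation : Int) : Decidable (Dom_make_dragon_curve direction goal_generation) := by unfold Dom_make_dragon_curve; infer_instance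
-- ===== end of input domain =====

-- B replaces A's doubling-and-reversing generation loop by a single forward pass
-- that derives each direction from the previous one via the 2-adic paper-folding turn rule
-- (alternative algorithm, same asymptotic cost).


-- ===== PORT A =====
def rotate_x_y (input_x input_y : Int) : Int × Int := (-1 * input_y, input_x)

-- returns (0,0) for direction outside 0..3, where the Python raises (excluded by Pre_)
def get_first_direction (direction : Int) : Int × Int :=
  if direction = 0 then (1, 0)
  else if direction = 1 then (0, -1)
  else if direction = 2 then (-1, 0)
  else if direction = 3 then (0, 1)
  else (0, 0)

-- one iteration of A's while loop body
def pvAStep (l : List (Int × Int)) : List (Int × Int) :=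
  l ++ (l.reverse.map (fun e => rotate_x_y (-1 * e.1) (-1 * e.2)))

-- the while loop, fuel = number of remaining generations
def pvALoop (fuel : Nat) (l : List (Int × Int)) : List (Int × Int) :=
  match fuel with
  | 0 => l
  | n + 1 => pvALoop n (pvAStep l)

def make_dragon_curve (direction : Int) (goal_generation : Int) : List (Int × Int) :=
  let first := get_first_direction direction
  pvALoop goal_generation.toNat [first]

-- ===== PORT B =====
def get_first_direction_b (direction : Int) : Int × Int :=
  if direction = 0 then (1, 0)
  else if direction = 1 then (0, -1)
  else if direction = 2 then (-1, 0)
  else if direction = 3 then (0, 1)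
  else (0, 0)

-- Source B's strip_twos: remove trailing factors of 2 (guard 0 < i only for termination)
def strip_twos (i : Nat) : Nat :=
  if h : 0 < i ∧ i % 2 = 0 then strip_twos (i / 2) else i
  decreasing_by exact Nat.div_lt_self h.1 (by omega)

def make_dragon_curve_alt (direction : Int) (goal_generation : Int) : List (Int × Int) :=
  let first := get_first_direction_b direction
  let total : Nat := if 0 < goal_generation then 2 ^ goal_generation.toNat else 1
  let res := (List.range' 1 (total - 1)).foldl
      (fun (st : List (Int × Int) × (Int × Int)) i =>
        let x := st.2.1
        let y := st.2.2
        if strip_twos i % 4 == 3 then (st.1 ++ [(-y, x)], (-y, x))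
        else (st.1 ++ [(y, -x)], (y, -x)))
      ([first], first)
  res.1

-- ===== PRECONDITION & SPEC =====
-- Pre_ excludes direction outside {0,1,2,3}: there get_first_direction returns None and A raises TypeError.
def Pre_make_dragon_curve (direction : Int) (goal_generation : Int) : Prop :=
  direction = 0 ∨ direction = 1 ∨ direction = 2 ∨ direction = 3
instance (direction : Int) (goal_generation : Int) : Decidable (Pre_make_dragon_curve direction goal_generation) := by unfold Pre_make_dragon_curve; infer_instance
def pvWitness_make_dragon_curve : Int × Int := (0, 3)

def Spec_make_dragon_curve (direction : Int) (goal_generation : Int) (out : List (Int × Int)) : Prop := out = make_dragon_curve_alt direction goal_generation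
instance (direction : Int) (goal_generation : Int) (out : List (Int × Int)) : Decidable (Spec_make_dragon_curve direction goal_generation out) := by unfold Spec_make_dragon_curve; infer_instance

-- ===== CLAIM (what is proved, stated in full; the proofs are below) =====
def Claim_equal_make_dragon_curve : Prop := ∀ (direction : Int) (goal_generation : Int), Dom_make_dragon_curve direction goal_generation → Pre_make_dragon_curve direction goal_generation → Spec_make_dragon_curve direction goal_generation (make_dragon_curve direction goal_generation)

-- ===== LEMMAS AND PROOFS =====

-- clockwise / counterclockwise quarter turns
def pvCw (p : Int × Int) : Int × Int := (p.2, -p.1)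
def pvCcw (p : Int × Int) : Int × Int := (-p.2, p.1)

-- the turn test of Source B
def pvT (i : Nat) : Bool := strip_twos i % 4 == 3

-- the direction sequence B generates
def pvSeq (f : Int × Int) : Nat → Int × Int
  | 0 => f
  | i + 1 => if pvT (i + 1) then pvCcw (pvSeq f i) else pvCw (pvSeq f i)

theorem pvCw_pvCcw (p : Int × Int) : pvCw (pvCcw p) = p := by
  simp [pvCw, pvCcw]

theorem pvCcw_pvCw (p : Int × Int) : pvCcw (pvCw p) = p := by
  simp [pvCw, pvCcw]

theorem strip_twos_odd (m : Nat) (h : m % 2 = 1) : strip_twos m = m := by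
  rw [strip_twos]; simp [h]

theorem strip_twos_even (m : Nat) (h0 : 0 < m) (h : m % 2 = 0) : strip_twos m = strip_twos (m / 2) := by
  rw [strip_twos]; simp [h0, h]

theorem strip_twos_mod_two (m : Nat) (h0 : 0 < m) : strip_twos m % 2 = 1 := by
  induction m using Nat.strong_induction_on with
  | _ m ih =>
    rcases Nat.even_or_odd m with he | ho
    · have h2 : m % 2 = 0 := Nat.even_iff.mp he
      rw [strip_twos_even m h0 h2]
      exact ih (m / 2) (Nat.div_lt_self h0 (by omega)) (by omega)
    · have h2 : m % 2 = 1 := Nat.odd_iff.mp ho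
      rw [strip_twos_odd m h2]; exact h2

-- key symmetry of the paper-folding rule, at the level of odd parts
theorem strip_sym (m : Nat) : ∀ n : Nat, 1 ≤ m → m < 2 ^ n →
    strip_twos (2 ^ (n + 1) - m) % 4 + strip_twos m % 4 = 4 := by
  induction m using Nat.strong_induction_on with
  | _ m ih =>
    intro n h1 hlt
    rcases Nat.even_or_odd m with he | ho
    · -- m even: halve and recurse
      have h2 : m % 2 = 0 := Nat.even_iff.mp he
      have hm2 : 2 ≤ m := by omega
      have hn : 1 ≤ n := by
        by_contra h
        interval_cases n <;> omega
      obtain ⟨k, rfl⟩ : ∃ k, n = k + 1 := ⟨n - 1, by omega⟩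
      have hp : 2 ^ (k + 1) = 2 * 2 ^ k := by ring
      have hp2 : 2 ^ (k + 1 + 1) = 2 * 2 ^ (k + 1) := by ring
      have hhalf : m / 2 < 2 ^ k := by omega
      have hsub : 2 ^ (k + 1 + 1) - m = 2 * (2 ^ (k + 1) - m / 2) := by omega
      have hpos : 0 < 2 ^ (k + 1) - m / 2 := by omega
      rw [hsub, strip_twos_even _ (by omega) (by omega),
        strip_twos_even m (by omega) h2]
      have : 2 * (2 ^ (k + 1) - m / 2) / 2 = 2 ^ (k + 1) - m / 2 := by omega
      rw [this]
      exact ih (m / 2) (by omega) k (by omega) hhalf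
    · -- m odd: both sides odd, direct arithmetic
      have h2 : m % 2 = 1 := Nat.odd_iff.mp ho
      have hn : 1 ≤ n := by
        by_contra h
        interval_cases n <;> omega
      have h4 : 2 ^ (n + 1) % 4 = 0 := by
        obtain ⟨k, rfl⟩ : ∃ k, n = k + 1 := ⟨n - 1, by omega⟩
        have : 2 ^ (k + 1 + 1) = 4 * 2 ^ k := by ring
        omega
      have hle : m < 2 ^ (n + 1) := by
        have : (2:Nat) ^ n ≤ 2 ^ (n + 1) := Nat.pow_le_pow_right (by omega) (by omega)
        omega
      have hodd : (2 ^ (n + 1) - m) % 2 = 1 := by omega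
      rw [strip_twos_odd _ hodd, strip_twos_odd m h2]
      omega

theorem pvT_sym (m n : Nat) (h1 : 1 ≤ m) (hlt : m < 2 ^ n) :
    pvT (2 ^ (n + 1) - m) = ! pvT m := by
  have hs := strip_sym m n h1 hlt
  have ho1 := strip_twos_mod_two m (by omega)
  unfold pvT
  rcases h : strip_twos m % 4 == 3 with _ | _ <;> simp_all <;> omega

theorem pvT_pow (n : Nat) : pvT (2 ^ n) = false := by
  unfold pvT
  induction n with
  | zero =>
    rw [pow_zero, strip_twos_odd 1 (by norm_num)]
    rfl
  | succ k ih =>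
    have hp : 2 ^ (k + 1) = 2 * 2 ^ k := by ring
    have hpos : 0 < 2 ^ k := Nat.two_pow_pos k
    rw [hp, strip_twos_even _ (by omega) (by omega)]
    have : 2 * 2 ^ k / 2 = 2 ^ k := by omega
    rw [this]; exact ih

-- pointwise form of A's doubling step on B's sequence
theorem pvSeq_mirror (f : Int × Int) (n : Nat) :
    ∀ j, j < 2 ^ n → pvSeq f (2 ^ n + j) = pvCw (pvSeq f (2 ^ n - 1 - j)) := by
  intro j
  induction j with
  | zero =>
    intro _
    have hpos : 0 < 2 ^ n := Nat.two_pow_pos n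
    have h : 2 ^ n + 0 = (2 ^ n - 1 - 0) + 1 := by omega
    rw [h, pvSeq]
    have ht : pvT ((2 ^ n - 1 - 0) + 1) = false := by
      have : (2 ^ n - 1 - 0) + 1 = 2 ^ n := by omega
      rw [this]; exact pvT_pow n
    rw [ht]; simp
  | succ j ih =>
    intro hj
    have hpos : 0 < 2 ^ n := Nat.two_pow_pos n
    have hj' : j < 2 ^ n := by omega
    have hstep : 2 ^ n + (j + 1) = (2 ^ n + j) + 1 := by omega
    rw [hstep, pvSeq, ih hj']
    have hm1 : 1 ≤ 2 ^ n - 1 - j := by omega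
    have hmlt : 2 ^ n - 1 - j < 2 ^ n := by omega
    have hbig : (2 ^ n + j) + 1 = 2 ^ (n + 1) - (2 ^ n - 1 - j) := by
      have : 2 ^ (n + 1) = 2 * 2 ^ n := by ring
      omega
    rw [hbig, pvT_sym (2 ^ n - 1 - j) n hm1 hmlt]
    obtain ⟨m', hmeq⟩ : ∃ m', 2 ^ n - 1 - j = m' + 1 := ⟨2 ^ n - 2 - j, by omega⟩
    have hm'' : 2 ^ n - 1 - (j + 1) = m' := by omega
    rw [hmeq, hm'', pvSeq]
    rcases h : pvT (m' + 1) with _ | _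
    · simp only [h, Bool.not_false, if_true, if_false]
      rw [pvCcw_pvCw]
      simp
    · simp only [h, Bool.not_true, if_false, if_true]
      rw [pvCw_pvCcw]
      simp

-- A's step on the prefix list of B's sequence
theorem pvAStep_map (f : Int × Int) (n : Nat) :
    pvAStep ((List.range (2 ^ n)).map (pvSeq f)) = (List.range (2 ^ (n + 1))).map (pvSeq f) := by
  have hpow : 2 ^ (n + 1) = 2 ^ n + 2 ^ n := by ring
  rw [hpow, List.range_add, List.map_append, pvAStep]
  congr 1
  apply List.ext_getElem
  · simp
  · intro i h1 h2
    simp only [List.length_map, List.length_reverse, List.length_range] at h1 h2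
    simp only [List.getElem_map, List.getElem_reverse, List.getElem_range, List.length_map,
      List.length_range]
    rw [pvSeq_mirror f n i (by omega)]
    simp [rotate_x_y, pvCw]

theorem pvALoop_map (f : Int × Int) (n : Nat) :
    pvALoop n [f] = (List.range (2 ^ n)).map (pvSeq f) := by
  -- first: pvALoop m l = iterate, pulled out as: pvALoop (m+1) l = pvAStep applied last
  have key : ∀ m l, pvALoop (m + 1) l = pvAStep (pvALoop m l) := by
    intro m
    induction m with
    | zero => intro l; rfl
    | succ k ih => intro l; rw [pvALoop, ih, pvALoop]
  induction n with
  | zero => simp [pvALoop, pvSeq]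
  | succ k ih => rw [key, ih, pvAStep_map]

-- B's fold builds exactly the prefix of pvSeq
theorem pvFold_spec (f : Int × Int) (k : Nat) :
    (List.range' 1 k).foldl
      (fun (st : List (Int × Int) × (Int × Int)) i =>
        let x := st.2.1
        let y := st.2.2
        if strip_twos i % 4 == 3 then (st.1 ++ [(-y, x)], (-y, x))
        else (st.1 ++ [(y, -x)], (y, -x)))
      ([f], f) = ((List.range (k + 1)).map (pvSeq f), pvSeq f k) := by
  induction k with
  | zero => simp [pvSeq]
  | succ j ih =>
    rw [List.range'_1_concat, List.foldl_append, ih]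
    simp only [List.foldl_cons, List.foldl_nil]
    have hcomm : 1 + j = j + 1 := by omega
    rw [hcomm]
    have hrange : List.range (j + 1 + 1) = List.range (j + 1) ++ [j + 1] := List.range_succ
    rw [hrange, List.map_append]
    show (if pvT (j + 1) then _ else _) = _
    rcases h : pvT (j + 1) with _ | _ <;>
      simp only [h, if_true, if_false, Bool.false_eq_true] <;>
      refine Prod.ext ?_ ?_ <;>
      simp [pvSeq, h, pvCcw, pvCw]

theorem make_dragon_curve_eq_alt (direction goal_generation : Int) :
    make_dragon_curve direction goal_generation = make_dragon_curve_alt direction goal_generation := by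
  unfold make_dragon_curve make_dragon_curve_alt
  have hfirst : get_first_direction direction = get_first_direction_b direction := rfl
  set f := get_first_direction direction with hf
  rcases (show goal_generation ≤ 0 ∨ 0 < goal_generation by omega) with hle | hgt
  · have h1 : goal_generation.toNat = 0 := Int.toNat_of_nonpos hle
    have h2 : ¬ (0 < goal_generation) := by omega
    simp [h1, h2, pvALoop, ← hfirst]
  · have h2 : (0 : Int) < goal_generation := hgt
    simp only [h2, if_true, ← hfirst]
    have hpos : 0 < 2 ^ goal_generation.toNat := Nat.two_pow_pos _
    rw [pvALoop_map, pvFold_spec]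
    have : 2 ^ goal_generation.toNat - 1 + 1 = 2 ^ goal_generation.toNat := by omega
    rw [this]

-- ===== VERDICT (by name: the statement is the Claim_ definition above) =====
theorem make_dragon_curve_spec : Claim_equal_make_dragon_curve := by
  intro direction goal_generation _ _
  unfold Spec_make_dragon_curve
  exact make_dragon_curve_eq_alt direction goal_generation
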